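-- pv_equiv track=rewrite | github.com/alphacoder01/hand-written-text-recognition | Code/test_images.py | truncateLabel
-- ===== SOURCE A (Python) =====
-- def truncateLabel( text, maxTextLen):
--         # ctc_loss can't compute loss if it cannot find a mapping between text label and input
--         # labels. Repeat letters cost double because of the blank symbol needing to be inserted.
--         # If a too-long label is provided, ctc_loss returns an infinite gradient
--     cost = 0
--     for i in range(len(text)):
--         if i != 0 and text[i] == text[i - 1]:
--             cost += 2
--         else:
--             cost += 1
--         if cost > maxTextLen:
--             return text[:i]
--     return text
-- ===== SOURCE B (Python) =====
-- def truncateLabel(text, maxTextLen):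
--     # Prefix-sum table of CTC costs, then binary search for the first
--     # prefix whose cost exceeds maxTextLen (prefix sums are strictly increasing).
--     prefix = [0]
--     for i in range(len(text)):
--         prefix.append(prefix[-1] + (2 if i != 0 and text[i] == text[i - 1] else 1))
--     lo, hi = 0, len(text)
--     while lo < hi:
--         mid = (lo + hi) // 2
--         if prefix[mid + 1] > maxTextLen:
--             hi = mid
--         else:
--             lo = mid + 1
--     return text[:lo]
-- ===== Notes on version B (the rewrite author's own statement) =====
-- stated objective: alternative
-- what changed: B builds a prefix-sum table of per-character CTC costs and binary-searches for the first prefix whose cost exceeds maxTextLen, instead of A's fused scan with an early return.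
import Mathlib
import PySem

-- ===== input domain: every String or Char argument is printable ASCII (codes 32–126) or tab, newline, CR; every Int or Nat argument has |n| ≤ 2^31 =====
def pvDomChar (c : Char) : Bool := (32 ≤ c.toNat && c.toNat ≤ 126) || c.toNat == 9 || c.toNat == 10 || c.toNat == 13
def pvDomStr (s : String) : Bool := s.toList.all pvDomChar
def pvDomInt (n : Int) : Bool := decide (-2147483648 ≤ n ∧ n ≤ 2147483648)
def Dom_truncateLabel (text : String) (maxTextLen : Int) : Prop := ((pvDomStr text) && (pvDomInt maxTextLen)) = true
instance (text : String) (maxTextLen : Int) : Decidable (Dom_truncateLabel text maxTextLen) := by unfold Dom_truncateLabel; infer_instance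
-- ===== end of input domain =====

-- B replaces A's fused scan-with-early-return by a prefix-cost table plus a binary
-- search for the first prefix whose cost exceeds maxTextLen (objective: alternative).

-- ===== PORT A =====
-- the 'for i in range(len(text))' loop with running cost and early return;
-- 'some r' = the early 'return text[:i]' (text[:i] with 0 ≤ i ≤ len is take i, exact),
-- 'none' = loop ran off the end (then A returns text).
def truncAGo (tl : List Char) (maxTextLen : Int) (cost : Int) (i : Nat) : Option (List Char) :=
  if i < tl.length then
    let cost' := if i ≠ 0 ∧ tl[i]! = tl[i-1]! then cost + 2 else cost + 1
    if cost' > maxTextLen then some (tl.take i)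
    else truncAGo tl maxTextLen cost' (i+1)
  else none
termination_by tl.length - i
decreasing_by omega

def truncateLabel (text : String) (maxTextLen : Int) : String :=
  match truncAGo text.toList maxTextLen 0 0 with
  | some r => String.ofList r
  | none => text

-- ===== PORT B =====
-- Source B's append loop building the prefix-cost list (prefix[-1] is getLast!)
def altPrefix (tl : List Char) : List Int :=
  (List.range tl.length).foldl
    (fun acc i => acc ++ [acc.getLast! + (if i ≠ 0 ∧ tl[i]! = tl[i-1]! then 2 else 1)]) [0]

-- Source B's 'while lo < hi' binary search ((lo+hi)//2 on naturals is Nat division, exact)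
def altSearch (pre : List Int) (maxTextLen : Int) (lo hi : Nat) : Nat :=
  if lo < hi then
    let mid := (lo + hi) / 2
    if pre[mid+1]! > maxTextLen then altSearch pre maxTextLen lo mid
    else altSearch pre maxTextLen (mid+1) hi
  else lo
termination_by hi - lo
decreasing_by all_goals omega

def truncateLabel_alt (text : String) (maxTextLen : Int) : String :=
  String.ofList (text.toList.take (altSearch (altPrefix text.toList) maxTextLen 0 text.toList.length))

-- ===== PRECONDITION & SPEC =====
def Spec_truncateLabel (text : String) (maxTextLen : Int) (out : String) : Prop := out = truncateLabel_alt text maxTextLen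
instance (text : String) (maxTextLen : Int) (out : String) : Decidable (Spec_truncateLabel text maxTextLen out) := by unfold Spec_truncateLabel; infer_instance

-- ===== CLAIM (what is proved, stated in full; the proofs are below) =====
def Claim_equal_truncateLabel : Prop := ∀ (text : String) (maxTextLen : Int), Dom_truncateLabel text maxTextLen → Spec_truncateLabel text maxTextLen (truncateLabel text maxTextLen)

-- ===== LEMMAS AND PROOFS =====

-- cumulative CTC cost of the first k characters
def pcost (tl : List Char) : Nat → Int
  | 0 => 0
  | k+1 => pcost tl k + (if k ≠ 0 ∧ tl[k]! = tl[k-1]! then 2 else 1)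

-- index of the first i < len with pcost (i+1) > M, else len
def firstIdx (tl : List Char) (M : Int) (i : Nat) : Nat :=
  if i < tl.length then
    (if pcost tl (i+1) > M then i else firstIdx tl M (i+1))
  else i
termination_by tl.length - i
decreasing_by omega

lemma pcost_succ (tl : List Char) (k : Nat) :
    pcost tl (k+1) = pcost tl k + (if k ≠ 0 ∧ tl[k]! = tl[k-1]! then 2 else 1) := by
  simp [pcost]

lemma pcost_mono (tl : List Char) : ∀ {a b : Nat}, a ≤ b → pcost tl a ≤ pcost tl b := by
  intro a b h
  induction b with
  | zero => simp_all
  | succ b ih =>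
    rcases Nat.lt_or_ge a (b+1) with h' | h'
    · have := ih (by omega)
      rw [pcost_succ]; split_ifs <;> omega
    · have : a = b + 1 := by omega
      subst this; rfl

lemma altPrefix_eq (tl : List Char) :
    altPrefix tl = (List.range (tl.length + 1)).map (pcost tl) := by
  unfold altPrefix
  have aux : ∀ k, (List.range k).foldl
      (fun acc i => acc ++ [acc.getLast! + (if i ≠ 0 ∧ tl[i]! = tl[i-1]! then 2 else 1)]) [0]
      = (List.range (k+1)).map (pcost tl) := by
    intro k
    induction k with
    | zero => simp [pcost]
    | succ k ih =>
      rw [List.range_succ, List.foldl_append, ih]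
      rw [List.range_succ (n := k + 1), List.map_append]
      simp only [List.foldl_cons, List.foldl_nil, List.map_cons, List.map_nil]
      congr 1
      have hne : (List.range (k+1)).map (pcost tl) = (List.range k).map (pcost tl) ++ [pcost tl k] := by
        rw [List.range_succ, List.map_append]; rfl
      rw [hne]
      have hl : ((List.range k).map (pcost tl) ++ [pcost tl k]).getLast! = pcost tl k := by simp
      rw [hl, ← pcost_succ]
  exact aux tl.length

lemma altPrefix_get (tl : List Char) {j : Nat} (h : j ≤ tl.length) :
    (altPrefix tl)[j]! = pcost tl j := by
  rw [altPrefix_eq]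
  have hlt : j < tl.length + 1 := Nat.lt_succ_of_le h
  rw [List.getElem!_eq_getElem?_getD, List.getElem?_map, List.getElem?_range hlt]
  rfl

lemma firstIdx_le (tl : List Char) (M : Int) : ∀ i, i ≤ tl.length → firstIdx tl M i ≤ tl.length := by
  intro i hi
  induction i using firstIdx.induct tl M with
  | case1 i h hp => unfold firstIdx; simp [h, hp]; omega
  | case2 i h hp ih => unfold firstIdx; simp only [h, if_true, hp, if_false]; exact ih (by omega)
  | case3 i h => unfold firstIdx; simpa [h]

lemma firstIdx_not_before (tl : List Char) (M : Int) :
    ∀ i j, i ≤ j → j < firstIdx tl M i → ¬ pcost tl (j+1) > M := by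
  intro i
  induction i using firstIdx.induct tl M with
  | case1 i h hp =>
    intro j hij hj
    unfold firstIdx at hj; simp [h, hp] at hj; omega
  | case2 i h hp ih =>
    intro j hij hj
    unfold firstIdx at hj; simp only [h, if_true, hp, if_false] at hj
    rcases Nat.eq_or_lt_of_le hij with rfl | hlt
    · exact hp
    · exact ih j hlt hj
  | case3 i h =>
    intro j hij hj
    unfold firstIdx at hj; simp [h] at hj; omega

lemma firstIdx_hit (tl : List Char) (M : Int) :
    ∀ i, firstIdx tl M i < tl.length → pcost tl (firstIdx tl M i + 1) > M := by
  intro i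
  induction i using firstIdx.induct tl M with
  | case1 i h hp => intro _; unfold firstIdx; simp only [h, if_true, hp]
  | case2 i h hp ih =>
    intro hlt
    unfold firstIdx at hlt ⊢
    simp only [h, if_true, hp, if_false] at hlt ⊢
    exact ih hlt
  | case3 i h => intro hlt; unfold firstIdx at hlt; simp [h] at hlt

-- A's loop computes take of the first index (or falls off the end)
lemma truncAGo_eq (tl : List Char) (M : Int) :
    ∀ i, truncAGo tl M (pcost tl i) i =
      if firstIdx tl M i < tl.length then some (tl.take (firstIdx tl M i)) else none := by
  intro i
  induction i using firstIdx.induct tl M with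
  | case1 i h hp =>
    unfold truncAGo firstIdx
    simp only [h, if_true]
    have : (if i ≠ 0 ∧ tl[i]! = tl[i-1]! then pcost tl i + 2 else pcost tl i + 1) = pcost tl (i+1) := by
      rw [pcost_succ]; split_ifs <;> ring
    rw [this]
    simp [hp, h]
  | case2 i h hp ih =>
    unfold truncAGo firstIdx
    simp only [h, if_true]
    have : (if i ≠ 0 ∧ tl[i]! = tl[i-1]! then pcost tl i + 2 else pcost tl i + 1) = pcost tl (i+1) := by
      rw [pcost_succ]; split_ifs <;> ring
    rw [this]
    simp only [hp, if_false]
    exact ih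
  | case3 i h =>
    unfold truncAGo firstIdx
    simp [h]

-- B's binary search converges to the first index
lemma altSearch_eq (tl : List Char) (M : Int) :
    ∀ lo hi, lo ≤ firstIdx tl M 0 → firstIdx tl M 0 ≤ hi → hi ≤ tl.length →
      altSearch (altPrefix tl) M lo hi = firstIdx tl M 0 := by
  intro lo hi
  induction lo, hi using altSearch.induct (altPrefix tl) M with
  | case1 lo hi h mid hp ih =>
    intro h1 h2 h3
    unfold altSearch
    simp only [h, if_true]
    rw [show (lo + hi)/2 = mid from rfl] at *
    rw [altPrefix_get tl (by omega)] at hp ⊢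
    -- pred mid holds, so firstIdx ≤ mid
    have hmlt : mid < hi := by omega
    have : firstIdx tl M 0 ≤ mid := by
      by_contra hc
      exact firstIdx_not_before tl M 0 mid (by omega) (by omega) hp
    simp only [hp, if_true]
    exact ih h1 this (by omega)
  | case2 lo hi h mid hp ih =>
    intro h1 h2 h3
    unfold altSearch
    simp only [h, if_true]
    rw [show (lo + hi)/2 = mid from rfl] at *
    rw [altPrefix_get tl (by omega)] at hp ⊢
    -- pred mid fails, so mid < firstIdx
    have hmlt : mid < hi := by omega
    have hmid : mid + 1 ≤ firstIdx tl M 0 := by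
      by_contra hc
      have hfi : firstIdx tl M 0 ≤ mid := by omega
      have hflt : firstIdx tl M 0 < tl.length := by omega
      have := firstIdx_hit tl M 0 hflt
      have hmono := pcost_mono tl (show firstIdx tl M 0 + 1 ≤ mid + 1 by omega)
      omega
    simp only [hp, if_false]
    exact ih hmid h2 h3
  | case3 lo hi h =>
    intro h1 h2 h3
    unfold altSearch
    simp only [h, if_false]
    omega

-- ===== VERDICT (by name: the statement is the Claim_ definition above) =====
theorem truncateLabel_spec : Claim_equal_truncateLabel := by
  intro text M _
  unfold Spec_truncateLabel truncateLabel truncateLabel_alt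
  set tl := text.toList with htl
  have hfi := truncAGo_eq tl M 0
  have h0 : pcost tl 0 = 0 := rfl
  rw [← h0, hfi]
  rw [altSearch_eq tl M 0 tl.length (by omega) (firstIdx_le tl M 0 (by omega)) le_rfl]
  by_cases hlt : firstIdx tl M 0 < tl.length
  · simp [hlt]
  · have : firstIdx tl M 0 = tl.length := by
      have := firstIdx_le tl M 0 (by omega); omega
    simp only [hlt, if_false]
    rw [this, List.take_length]
    exact String.ofList_toList.symm
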